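-- pv_equiv track=rewrite | github.com/researchartifacts/artifact_analysis | src/utils/committee_statistics.py | calculate_affiliation_stats
-- ===== SOURCE A (Python) =====
-- def calculate_affiliation_stats(results: dict[str, list[dict]]) -> dict[str, list[dict]]:
--     affiliation_stats: dict[str, list[dict]] = {}
--     for name in results:
--         for member in results[name]:
--             affiliation = member["affiliation"]
--             if affiliation not in affiliation_stats:
--                 affiliation_stats[affiliation] = []
--                 affiliation_stats[affiliation].append(member)
--             else:
--                 affiliation_stats[affiliation].append(member)
--
--     return affiliation_stats
-- ===== SOURCE B (Python) =====
-- def calculate_affiliation_stats(results: dict[str, list[dict]]) -> dict[str, list[dict]]: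
--     members = [m for name in results for m in results[name]]
--     keys = list(dict.fromkeys(m["affiliation"] for m in members))
--     return {k: [m for m in members if m["affiliation"] == k] for k in keys}
-- ===== Notes on version B (the rewrite author's own statement) =====
-- stated objective: simpler
-- what changed: Replaces the incremental dict-bucket insertion loop with a three-step pipeline: flatten all members, dedup the affiliation keys in first-encounter order, then build each group with a per-key filter comprehension.
import Mathlib
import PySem

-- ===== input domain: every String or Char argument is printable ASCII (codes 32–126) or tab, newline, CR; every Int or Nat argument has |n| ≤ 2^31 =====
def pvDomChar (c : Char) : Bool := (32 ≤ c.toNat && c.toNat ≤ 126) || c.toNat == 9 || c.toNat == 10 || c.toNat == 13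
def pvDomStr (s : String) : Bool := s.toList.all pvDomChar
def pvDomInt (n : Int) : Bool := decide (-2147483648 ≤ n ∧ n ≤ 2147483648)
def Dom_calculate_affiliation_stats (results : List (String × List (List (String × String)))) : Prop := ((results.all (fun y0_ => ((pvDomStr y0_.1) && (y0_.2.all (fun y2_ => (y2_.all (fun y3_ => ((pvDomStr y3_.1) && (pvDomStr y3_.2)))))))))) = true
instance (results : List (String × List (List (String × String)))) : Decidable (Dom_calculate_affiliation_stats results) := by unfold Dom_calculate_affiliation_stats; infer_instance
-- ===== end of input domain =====

-- B replaces A's incremental dict-bucket insertion with flatten + ordered key dedup + per-key filter (simpler decomposition, same results).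

-- ===== PORT A =====
-- A builds a dict of buckets member by member; member["affiliation"] raises KeyError when the key
-- is missing (the `none` branch below is unreachable under Pre_).
def calculate_affiliation_stats (results : List (String × List (List (String × String)))) : List (String × List (List (String × String))) :=
  (results.foldl (fun affiliation_stats nv =>
      nv.2.foldl (fun affiliation_stats member =>
        match (PySem.Dict.mk member).get? "affiliation" with
        | none => affiliation_stats  -- Python raises KeyError here; excluded by Pre_
        | some affiliation =>
          if affiliation_stats.contains affiliation = false then
            (affiliation_stats.insert affiliation []).modify affiliation [] (fun b => b ++ [member])
          else
            affiliation_stats.modify affiliation [] (fun b => b ++ [member]))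
        affiliation_stats)
    (PySem.Dict.empty : PySem.Dict String (List (List (String × String))))).items

-- ===== PORT B =====
-- member["affiliation"]; total with default "" — the missing-key case (Python KeyError) is outside Pre_.
def pvAff (m : List (String × String)) : String := ((PySem.Dict.mk m).get? "affiliation").getD ""

def calculate_affiliation_stats_alt (results : List (String × List (List (String × String)))) : List (String × List (List (String × String))) :=
  let members := results.flatMap (fun nv => nv.2)
  let keys := PySem.List.dedup (members.map pvAff)
  keys.map (fun k => (k, members.filter (fun m => pvAff m == k)))

-- ===== PRECONDITION & SPEC =====
-- Pre_ excludes exactly the inputs where some member lacks the "affiliation" key: there Python A raises KeyError.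
def Pre_calculate_affiliation_stats (results : List (String × List (List (String × String)))) : Prop :=
  ∀ nv ∈ results, ∀ m ∈ nv.2, (PySem.Dict.mk m).contains "affiliation" = true
instance (results : List (String × List (List (String × String)))) : Decidable (Pre_calculate_affiliation_stats results) := by unfold Pre_calculate_affiliation_stats; infer_instance

def pvWitness_calculate_affiliation_stats : (List (String × List (List (String × String)))) :=
  [("alice", [[("affiliation", "MIT"), ("role", "chair")], [("affiliation", "KIT")]]), ("bob", [[("affiliation", "MIT")]])]

def Spec_calculate_affiliation_stats (results : List (String × List (List (String × String)))) (out : List (String × List (List (String × String)))) : Prop := out = calculate_affiliation_stats_alt results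
instance (results : List (String × List (List (String × String)))) (out : List (String × List (List (String × String)))) : Decidable (Spec_calculate_affiliation_stats results out) := by unfold Spec_calculate_affiliation_stats; infer_instance

-- ===== CLAIM (what is proved, stated in full; the proofs are below) =====
def Claim_equal_calculate_affiliation_stats : Prop := ∀ (results : List (String × List (List (String × String)))), Dom_calculate_affiliation_stats results → Pre_calculate_affiliation_stats results → Spec_calculate_affiliation_stats results (calculate_affiliation_stats results)

-- ===== LEMMAS AND PROOFS =====

-- the collapsed per-member step of A (both branches, with the key known present)
def pvStep (st : PySem.Dict String (List (List (String × String)))) (m : List (String × String)) :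
    PySem.Dict String (List (List (String × String))) :=
  st.modify (pvAff m) [] (fun b => b ++ [m])

lemma pv_insert_nil_modify (st : PySem.Dict String (List (List (String × String)))) (a : String)
    (f : List (List (String × String)) → List (List (String × String))) (h : st.contains a = false) :
    (st.insert a []).modify a [] f = st.modify a [] f := by
  unfold PySem.Dict.modify
  rw [PySem.Dict.getD_insert_self, PySem.Dict.getD_of_not_contains st [] h,
    PySem.Dict.insert_insert_self]

lemma pv_stepA_eq (st : PySem.Dict String (List (List (String × String)))) (m : List (String × String))
    (h : (PySem.Dict.mk m).contains "affiliation" = true) :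
    (match (PySem.Dict.mk m).get? "affiliation" with
      | none => st
      | some affiliation =>
        if st.contains affiliation = false then
          (st.insert affiliation []).modify affiliation [] (fun b => b ++ [m])
        else
          st.modify affiliation [] (fun b => b ++ [m])) = pvStep st m := by
  have hs : ∃ a, (PySem.Dict.mk m).get? "affiliation" = some a := by
    rw [← Option.isSome_iff_exists, ← PySem.Dict.contains_eq_isSome_get?]; exact h
  obtain ⟨a, ha⟩ := hs
  rw [ha]
  dsimp only
  have haff : pvAff m = a := by simp [pvAff, ha]
  by_cases hc : st.contains a = false
  · rw [if_pos hc]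
    unfold pvStep
    rw [haff]
    exact pv_insert_nil_modify st a _ hc
  · rw [if_neg hc]
    unfold pvStep
    rw [haff]

lemma pv_dict_eq (results : List (String × List (List (String × String))))
    (hpre : Pre_calculate_affiliation_stats results) :
    calculate_affiliation_stats results =
      ((results.flatMap (fun nv => nv.2)).foldl pvStep
        (PySem.Dict.empty : PySem.Dict String (List (List (String × String))))).items := by
  unfold calculate_affiliation_stats
  congr 1
  rw [List.foldl_flatMap]
  apply PySem.List.foldl_congr_mem
  intro acc nv hnv
  apply PySem.List.foldl_congr_mem
  intro st m hm
  exact pv_stepA_eq st m (hpre nv hnv m hm)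

lemma pv_foldl_step (members : List (List (String × String)))
    (d : PySem.Dict String (List (List (String × String)))) :
    members.foldl pvStep d =
      (members.map (fun m => (pvAff m, m))).foldl (fun d p => d.modify p.1 [] (fun b => b ++ [p.2])) d := by
  rw [List.foldl_map]
  rfl

lemma pv_keys (members : List (List (String × String))) :
    ((members.foldl pvStep
        (PySem.Dict.empty : PySem.Dict String (List (List (String × String))))).keys) =
      PySem.List.dedup (members.map pvAff) := by
  show (members.foldl (fun d m => d.modify (pvAff m) [] (fun b => b ++ [m]))
      (PySem.Dict.empty : PySem.Dict String (List (List (String × String))))).keys = _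
  rw [PySem.Dict.keys_foldl_modify_key members pvAff [] (fun _ m => fun b => b ++ [m])]
  rw [PySem.List.dedup_eq_ofList, PySem.Set.ofList_eq_foldl]
  simp [PySem.Set.update, PySem.Dict.keys_empty]

lemma pv_getD (members : List (List (String × String))) (k : String) :
    ((members.foldl pvStep
        (PySem.Dict.empty : PySem.Dict String (List (List (String × String))))).getD k []) =
      members.filter (fun m => pvAff m == k) := by
  rw [pv_foldl_step, PySem.Dict.getD_foldl_modify_append, PySem.Dict.getD_empty, List.filter_map]
  simp [Function.comp_def]

-- ===== VERDICT (by name: the statement is the Claim_ definition above) =====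
theorem calculate_affiliation_stats_spec : Claim_equal_calculate_affiliation_stats := by
  intro results _ hpre
  unfold Spec_calculate_affiliation_stats calculate_affiliation_stats_alt
  rw [pv_dict_eq results hpre]
  set members := results.flatMap (fun nv => nv.2) with hmem
  have hnd : ((members.foldl pvStep
      (PySem.Dict.empty : PySem.Dict String (List (List (String × String))))).keys).Nodup := by
    rw [pv_keys]
    exact PySem.List.nodup_dedup _
  rw [PySem.Dict.items_eq_map_keys _ hnd [], pv_keys]
  exact List.map_congr_left (fun k _ => by rw [pv_getD])
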